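-- pv_equiv track=rewrite | github.com/adamatan/advent-of-code-2019 | 2019/day_8.py | merge_layers
-- ===== SOURCE A (Python) =====
-- def get_layers(pixels, height, width):
--     '''Returns a list of even-sized height*width sized chunks of pixels
--     see https://stackoverflow.com/a/312464/51197'''
--     rv = []
--     index = 0
--     layer_size = height * width
--     while index < len(pixels):
--         rv.append(pixels[index:index+layer_size])
--         index += layer_size
--     return rv
--
-- def merge_layers(pixels, height, width):
--     '''Combines multiple image layers into one. Transparent pixels
--     in upper layers take the color of the highest colored pixel
--     in deeper layers.'''
--     layers = get_layers(pixels, height, width)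
--
--     combined_layer = list(layers[0])
--     for layer in layers[1:]:
--         for index in range(len(layer)):
--             if combined_layer[index] == '2':
--                 combined_layer[index] = layer[index]
--     return combined_layer
-- ===== SOURCE B (Python) =====
-- def get_layers(pixels, height, width):
--     '''Returns a list of even-sized height*width sized chunks of pixels'''
--     rv = []
--     index = 0
--     layer_size = height * width
--     while index < len(pixels):
--         rv.append(pixels[index:index+layer_size])
--         index += layer_size
--     return rv
--
-- def merge_layers(pixels, height, width):
--     '''Column-wise merge: for each position, take the first non-'2' pixel
--     across the layers (topmost first), defaulting to '2'.'''
--     layers = get_layers(pixels, height, width)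
--     first = layers[0]
--     return [next((layer[i] for layer in layers if i < len(layer) and layer[i] != '2'), '2')
--             for i in range(len(first))]
-- ===== Notes on version B (the rewrite author's own statement) =====
-- stated objective: alternative
-- what changed: B builds the merged layer column-by-column, taking for each position the first non-'2' pixel across the layers with an early-exit generator scan, instead of A's repeated in-place overwrite pass over every layer.
import Mathlib
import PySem

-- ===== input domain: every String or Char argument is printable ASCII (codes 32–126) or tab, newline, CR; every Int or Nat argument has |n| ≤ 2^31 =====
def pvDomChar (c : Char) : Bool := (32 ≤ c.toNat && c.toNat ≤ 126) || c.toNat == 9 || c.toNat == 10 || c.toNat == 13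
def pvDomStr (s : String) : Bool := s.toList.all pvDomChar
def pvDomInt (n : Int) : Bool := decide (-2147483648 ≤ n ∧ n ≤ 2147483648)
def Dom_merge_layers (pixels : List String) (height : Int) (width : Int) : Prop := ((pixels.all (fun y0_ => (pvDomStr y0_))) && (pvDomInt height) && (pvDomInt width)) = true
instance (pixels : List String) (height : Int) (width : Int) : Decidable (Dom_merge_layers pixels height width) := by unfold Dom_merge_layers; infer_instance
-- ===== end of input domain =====

-- B merges column-by-column (first non-'2' pixel per position, early exit) instead of A's
-- layer-by-layer overwrite passes; an alternative decomposition of the same cost.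

-- ===== PORT A =====
-- get_layers' while loop; fuel = pixels.length + 1 only makes the loop total (under
-- Pre_ the step is ≥ 1, so the fuel is never exhausted).
def glLoop (pixels : List String) (size : Int) : Nat → Int → List (List String) → List (List String)
  | 0, _, acc => acc.reverse
  | fuel + 1, index, acc =>
      if index < (pixels.length : Int) then
        glLoop pixels size fuel (index + size)
          (PySem.List.slice pixels (some index) (some (index + size)) :: acc)
      else acc.reverse

def get_layers_port (pixels : List String) (height : Int) (width : Int) : List (List String) :=
  glLoop pixels (height * width) (pixels.length + 1) 0 []

-- A: combined = list(layers[0]); for layer in layers[1:]: for index in range(len(layer)):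
--    if combined[index] == '2': combined[index] = layer[index]
-- layers[0] is in range under Pre_ (getD [] totalizes); indices are in range there too
-- (getD ""/set are exact in range).
def merge_layers (pixels : List String) (height : Int) (width : Int) : List String :=
  let layers := get_layers_port pixels height width
  let combined := layers.getD 0 []
  (layers.drop 1).foldl
    (fun comb layer =>
      (List.range layer.length).foldl
        (fun c idx => if c.getD idx "" = "2" then c.set idx (layer.getD idx "") else c)
        comb)
    combined

-- ===== PORT B =====
-- next((layer[i] for layer in layers if i < len(layer) and layer[i] != '2'), '2')
def colScan (layers : List (List String)) (i : Nat) : String :=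
  match layers.find? (fun l => decide (i < l.length) && (l.getD i "2" != "2")) with
  | some l => l.getD i "2"
  | none => "2"

def merge_layers_alt (pixels : List String) (height : Int) (width : Int) : List String :=
  let layers := get_layers_port pixels height width
  let first := layers.getD 0 []
  (List.range first.length).map (fun i => colScan layers i)

-- ===== PRECONDITION & SPEC =====
-- Python A raises IndexError (layers[0]) on empty pixels and loops forever when
-- height*width ≤ 0 with nonempty pixels; Pre_ is exactly where A returns.
def Pre_merge_layers (pixels : List String) (height : Int) (width : Int) : Prop :=
  pixels ≠ [] ∧ 0 < height * width
instance (pixels : List String) (height : Int) (width : Int) : Decidable (Pre_merge_layers pixels height width) := by unfold Pre_merge_layers; infer_instance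

def pvWitness_merge_layers : List String × Int × Int := (["1", "2", "0", "2"], 2, 1)

def Spec_merge_layers (pixels : List String) (height : Int) (width : Int) (out : List String) : Prop := out = merge_layers_alt pixels height width
instance (pixels : List String) (height : Int) (width : Int) (out : List String) : Decidable (Spec_merge_layers pixels height width out) := by unfold Spec_merge_layers; infer_instance

-- ===== CLAIM (what is proved, stated in full; the proofs are below) =====
def Claim_equal_merge_layers : Prop := ∀ (pixels : List String) (height : Int) (width : Int), Dom_merge_layers pixels height width → Pre_merge_layers pixels height width → Spec_merge_layers pixels height width (merge_layers pixels height width)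

-- ===== LEMMAS AND PROOFS =====

-- A's inner loop body over one layer (definitionally the lambda in merge_layers).
def innerStep (layer : List String) (c : List String) (idx : Nat) : List String :=
  if c.getD idx "" = "2" then c.set idx (layer.getD idx "") else c

def outerFold (rest : List (List String)) (comb : List String) : List String :=
  rest.foldl (fun c layer => (List.range layer.length).foldl (innerStep layer) c) comb

lemma innerN_len (layer comb : List String) (n : Nat) :
    ((List.range n).foldl (innerStep layer) comb).length = comb.length := by
  induction n generalizing comb with
  | zero => simp
  | succ n ih =>
      rw [List.range_succ, List.foldl_append]
      simp only [List.foldl_cons, List.foldl_nil, innerStep]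
      split_ifs <;> simp [ih]

lemma innerN_getD (layer comb : List String) (n i : Nat) :
    ((List.range n).foldl (innerStep layer) comb)[i]?.getD "" =
      if i < n ∧ comb[i]?.getD "" = "2" then layer[i]?.getD "" else comb[i]?.getD "" := by
  induction n generalizing i with
  | zero => simp
  | succ n ih =>
      rw [List.range_succ, List.foldl_append]
      simp only [List.foldl_cons, List.foldl_nil, innerStep, List.getD_eq_getElem?_getD]
      set c' := (List.range n).foldl (innerStep layer) comb with hc'
      by_cases hi : i = n
      · subst hi
        have hci : c'[i]?.getD "" = comb[i]?.getD "" := by rw [ih]; simp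
        rw [hci]
        by_cases h2 : comb[i]?.getD "" = "2"
        · rw [if_pos h2]
          have hlt : i < comb.length := by
            by_contra hge
            rw [List.getElem?_eq_none (by omega)] at h2
            simp at h2
          have hlt' : i < c'.length := by rw [hc', innerN_len]; exact hlt
          rw [List.getElem?_set_self hlt']
          simp [h2]
        · rw [if_neg h2, hci]
          simp [h2]
      · have hiff : i < n + 1 ↔ i < n := by omega
        have hstep : (if c'[n]?.getD "" = "2" then c'.set n (layer[n]?.getD "") else c')[i]?.getD ""
            = c'[i]?.getD "" := by
          split_ifs with h
          · rw [List.getElem?_set_ne (by omega : n ≠ i)]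
          · rfl
        rw [hstep, ih]
        simp only [hiff]

lemma outerFold_len (rest : List (List String)) (comb : List String) :
    (outerFold rest comb).length = comb.length := by
  induction rest generalizing comb with
  | nil => rfl
  | cons l rest ih => simp only [outerFold, List.foldl_cons] at *; rw [ih, innerN_len]

lemma outerFold_getD (rest : List (List String)) (comb : List String) (i : Nat) :
    (outerFold rest comb)[i]?.getD "" =
      if comb[i]?.getD "" = "2" then colScan rest i else comb[i]?.getD "" := by
  induction rest generalizing comb with
  | nil => simp [outerFold, colScan]
  | cons l rest ih =>
      simp only [outerFold, List.foldl_cons] at ih ⊢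
      rw [ih, innerN_getD]
      unfold colScan
      simp only [List.find?_cons, List.getD_eq_getElem?_getD]
      by_cases h2 : comb[i]?.getD "" = "2"
      · by_cases hlen : i < l.length
        · by_cases hv : l[i]'hlen = "2"
          · simp [hlen, h2, hv]
          · have hb : (l[i]'hlen != "2") = true := by simp [hv]
            simp [hlen, h2, hb, hv]
        · simp [hlen, h2]
      · by_cases hlen : i < l.length <;> simp [hlen, h2]

lemma merge_general (layers : List (List String)) :
    outerFold (layers.drop 1) (layers.getD 0 []) =
      (List.range (layers.getD 0 []).length).map (fun i => colScan layers i) := by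
  cases layers with
  | nil => simp [outerFold]
  | cons l0 rest =>
      simp only [List.drop_succ_cons, List.drop_zero, List.getD_cons_zero]
      have hlen : (outerFold rest l0).length = l0.length := outerFold_len rest l0
      apply List.ext_getElem
      · simp [hlen]
      · intro i h1 h2
        have hifirst : i < l0.length := by rw [hlen] at h1; exact h1
        have hL : (outerFold rest l0)[i] = (outerFold rest l0)[i]?.getD "" := by
          rw [List.getElem?_eq_getElem h1]; rfl
        rw [hL, outerFold_getD]
        have hR : ((List.range l0.length).map (fun i => colScan (l0 :: rest) i))[i] =
            colScan (l0 :: rest) i := by simp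
        rw [hR]
        unfold colScan
        simp only [List.find?_cons, List.getD_eq_getElem?_getD]
        by_cases hv : l0[i]'hifirst = "2"
        · simp [hifirst, hv]
        · have hb : (l0[i]'hifirst != "2") = true := by simp [hv]
          simp [hifirst, hb, hv]

lemma merge_eq_alt (pixels : List String) (height : Int) (width : Int) :
    merge_layers pixels height width = merge_layers_alt pixels height width := by
  show outerFold ((get_layers_port pixels height width).drop 1)
      ((get_layers_port pixels height width).getD 0 []) =
    (List.range ((get_layers_port pixels height width).getD 0 []).length).map
      (fun i => colScan (get_layers_port pixels height width) i)
  exact merge_general _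

-- ===== VERDICT (by name: the statement is the Claim_ definition above) =====
theorem merge_layers_spec : Claim_equal_merge_layers := by
  intro pixels height width _ _
  unfold Spec_merge_layers
  exact merge_eq_alt pixels height width
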